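-- pv_equiv track=rewrite | github.com/JMollerach/abstraccion-raft | abstractor.py | generar_estados
-- ===== SOURCE A (Python) =====
-- def generar_estados(dicc_predicados):
--     n = len(dicc_predicados)
--     result = {}
--
--     # 1 << n = to 2^n
--     for i in range(1 << n):
--         subset = ""
--         nombre = ""
--         j=0
--         for predicado in dicc_predicados.keys():
--
--             # If the j-th bit is set in i, include
--             # the j-th character from s
--             if i & (1 << j):
--                 nombre += predicado
--                 subset += " /\\ " + dicc_predicados[predicado]
--             else:
--                 nombre += "not" + predicado
--                 subset += " /\\ \\lnot(" + dicc_predicados[predicado] + ")"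
--             j+=1
--         result[nombre]=subset
--
--     return result
-- ===== SOURCE B (Python) =====
-- def generar_estados(dicc_predicados):
--     result = {"": ""}
--     for pred, val in dicc_predicados.items():
--         new = {}
--         for name, subset in result.items():
--             new[name + "not" + pred] = subset + " /\\ \\lnot(" + val + ")"
--         for name, subset in result.items():
--             new[name + pred] = subset + " /\\ " + val
--         result = new
--     return result
-- ===== Notes on version B (the rewrite author's own statement) =====
-- stated objective: simpler
-- what changed: B folds over the predicates once, doubling a dictionary of partial formulas at each step, instead of enumerating all 2^n bitmask integers and re-scanning every predicate with bit tests for each mask.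
import Mathlib
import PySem

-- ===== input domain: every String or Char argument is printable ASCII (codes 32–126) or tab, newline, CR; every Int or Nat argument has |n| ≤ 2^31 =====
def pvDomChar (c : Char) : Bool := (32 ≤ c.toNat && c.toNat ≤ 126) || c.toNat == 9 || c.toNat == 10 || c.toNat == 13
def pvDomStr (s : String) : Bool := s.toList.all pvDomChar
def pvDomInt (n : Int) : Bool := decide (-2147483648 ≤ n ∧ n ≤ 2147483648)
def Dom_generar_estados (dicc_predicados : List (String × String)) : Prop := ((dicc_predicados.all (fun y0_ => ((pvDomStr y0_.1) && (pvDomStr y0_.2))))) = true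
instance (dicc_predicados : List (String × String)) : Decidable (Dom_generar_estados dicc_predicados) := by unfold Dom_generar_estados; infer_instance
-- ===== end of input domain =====

-- B replaces A's enumeration of all 2^n bitmasks (with per-mask bit tests over every
-- predicate) by a single fold over the predicates that doubles a dictionary of partial
-- formulas at each step; objective: simpler.

-- ===== PORT A =====
def generar_estados (dicc_predicados : List (String × String)) : List (String × String) :=
  let d := PySem.Dict.ofList dicc_predicados
  let n : Nat := d.size
  let result : PySem.Dict String String :=
    (PySem.List.pyRange 0 ((1 : Int) <<< n) 1).foldl (fun result i =>
      let st : String × String × Nat :=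
        d.keys.foldl (fun st predicado =>
          if PySem.Int.band i ((1 : Int) <<< st.2.2) ≠ 0 then
            (st.1 ++ " /\\ " ++ d.getD predicado "", st.2.1 ++ predicado, st.2.2 + 1)
          else
            (st.1 ++ " /\\ \\lnot(" ++ d.getD predicado "" ++ ")", st.2.1 ++ "not" ++ predicado, st.2.2 + 1))
          ("", "", 0)
      result.insert st.2.1 st.1)
      PySem.Dict.empty
  result.items

-- ===== PORT B =====
def generar_estados_alt (dicc_predicados : List (String × String)) : List (String × String) :=
  let d := PySem.Dict.ofList dicc_predicados
  let result : PySem.Dict String String :=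
    d.items.foldl (fun result pv =>
      let new : PySem.Dict String String :=
        result.items.foldl (fun new ns =>
          new.insert (ns.1 ++ "not" ++ pv.1) (ns.2 ++ " /\\ \\lnot(" ++ pv.2 ++ ")"))
          PySem.Dict.empty
      result.items.foldl (fun new ns =>
        new.insert (ns.1 ++ pv.1) (ns.2 ++ " /\\ " ++ pv.2)) new)
      (PySem.Dict.empty.insert "" "")
  result.items

-- ===== PRECONDITION & SPEC =====
def Spec_generar_estados (dicc_predicados : List (String × String)) (out : List (String × String)) : Prop := out = generar_estados_alt dicc_predicados
instance (dicc_predicados : List (String × String)) (out : List (String × String)) : Decidable (Spec_generar_estados dicc_predicados out) := by unfold Spec_generar_estados; infer_instance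

-- ===== CLAIM (what is proved, stated in full; the proofs are below) =====
def Claim_equal_generar_estados : Prop := ∀ (dicc_predicados : List (String × String)), Dom_generar_estados dicc_predicados → Spec_generar_estados dicc_predicados (generar_estados dicc_predicados)

-- ===== LEMMAS AND PROOFS =====

-- A's inner loop body, over an item pair (predicate, value), for mask m
def pvInnerF (m : Nat) (st : String × String × Nat) (p : String × String) : String × String × Nat :=
  if PySem.Int.band (m : Int) ((1 : Int) <<< st.2.2) ≠ 0 then
    (st.1 ++ " /\\ " ++ p.2, st.2.1 ++ p.1, st.2.2 + 1)
  else
    (st.1 ++ " /\\ \\lnot(" ++ p.2 ++ ")", st.2.1 ++ "not" ++ p.1, st.2.2 + 1)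

-- the (nombre, subset) pair A computes for mask m over item list L
def pvPairA (L : List (String × String)) (m : Nat) : String × String :=
  ((L.foldl (pvInnerF m) ("", "", 0)).2.1, (L.foldl (pvInnerF m) ("", "", 0)).1)

-- the full insertion sequence of A, in mask order
def pvSeqA (L : List (String × String)) : List (String × String) :=
  (List.range (2 ^ L.length)).map (pvPairA L)

-- fold of dict-inserts of a pair list into d
def pvInsFold (xs : List (String × String)) (d : PySem.Dict String String) : PySem.Dict String String :=
  xs.foldl (fun d q => d.insert q.1 q.2) d

def pvDictOf (xs : List (String × String)) : PySem.Dict String String :=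
  pvInsFold xs PySem.Dict.empty

-- last value bound to key k in an insertion sequence
def pvLastVal (xs : List (String × String)) (k : String) : Option String :=
  (xs.reverse.find? (fun q => q.1 == k)).map Prod.snd

-- the two entry-extension maps of B, for predicate pair p
def pvExtN (p q : String × String) : String × String :=
  (q.1 ++ "not" ++ p.1, q.2 ++ " /\\ \\lnot(" ++ p.2 ++ ")")
def pvExtY (p q : String × String) : String × String :=
  (q.1 ++ p.1, q.2 ++ " /\\ " ++ p.2)

-- B's outer loop body
def pvStepB (result : PySem.Dict String String) (pv : String × String) : PySem.Dict String String :=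
  let new : PySem.Dict String String :=
    result.items.foldl (fun new ns =>
      new.insert (ns.1 ++ "not" ++ pv.1) (ns.2 ++ " /\\ \\lnot(" ++ pv.2 ++ ")"))
      PySem.Dict.empty
  result.items.foldl (fun new ns =>
    new.insert (ns.1 ++ pv.1) (ns.2 ++ " /\\ " ++ pv.2)) new

def pvDictB (L : List (String × String)) : PySem.Dict String String :=
  L.foldl pvStepB (PySem.Dict.empty.insert "" "")

-- keys of an insert fold
theorem pvKeys_insFold (xs : List (String × String)) (d : PySem.Dict String String) :
    (pvInsFold xs d).keys = PySem.Set.update d.keys (xs.map Prod.fst) := by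
  simpa using PySem.Dict.keys_foldl_insert_key xs Prod.fst (fun _ q => q.2) d

theorem pvNodup_insFold (xs : List (String × String)) (d : PySem.Dict String String)
    (h : d.keys.Nodup) : (pvInsFold xs d).keys.Nodup := by
  simpa using PySem.Dict.nodup_keys_foldl_insert_key xs Prod.fst (fun _ q => q.2) d h

-- j-counter of A's inner fold
theorem pvInnerF_j (m : Nat) (st : String × String × Nat) (p : String × String) :
    (pvInnerF m st p).2.2 = st.2.2 + 1 := by
  unfold pvInnerF; split_ifs <;> rfl

theorem pvInner_j (L : List (String × String)) (m : Nat) (st0 : String × String × Nat) :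
    (L.foldl (pvInnerF m) st0).2.2 = st0.2.2 + L.length := by
  induction L generalizing st0 with
  | nil => simp
  | cons p L ih =>
    rw [List.foldl_cons, ih, pvInnerF_j]
    simp only [List.length_cons]
    omega

-- the branch condition is a bit test
theorem pvCond_iff (m j : Nat) :
    (PySem.Int.band (m : Int) ((1 : Int) <<< j) ≠ 0) ↔ m.testBit j = true := by
  have h1 : ((1 : Int) <<< j) = ((2 ^ j : Nat) : Int) := by
    rw [Int.shiftLeft_eq]; push_cast; ring
  rw [h1, PySem.Int.band_natCast, Nat.and_two_pow]
  cases h : m.testBit j <;> simp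

-- A's inner fold only reads bits of m below st0.2.2 + L.length
theorem pvInner_bits (L : List (String × String)) (m m' : Nat) (st0 : String × String × Nat)
    (h : ∀ j, st0.2.2 ≤ j → j < st0.2.2 + L.length → m.testBit j = m'.testBit j) :
    L.foldl (pvInnerF m) st0 = L.foldl (pvInnerF m') st0 := by
  induction L generalizing st0 with
  | nil => rfl
  | cons p L ih =>
    simp only [List.foldl_cons]
    have hb : m.testBit st0.2.2 = m'.testBit st0.2.2 := by
      apply h
      · omega
      · simp only [List.length_cons]; omega
    have hcond : (PySem.Int.band (m : Int) ((1 : Int) <<< st0.2.2) ≠ 0)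
        ↔ (PySem.Int.band (m' : Int) ((1 : Int) <<< st0.2.2) ≠ 0) := by
      rw [pvCond_iff, pvCond_iff, hb]
    have hstep : pvInnerF m st0 p = pvInnerF m' st0 p := by
      unfold pvInnerF
      by_cases hc : PySem.Int.band (m : Int) ((1 : Int) <<< st0.2.2) ≠ 0
      · rw [if_pos hc, if_pos (hcond.mp hc)]
      · rw [if_neg hc, if_neg (fun hc' => hc (hcond.mpr hc'))]
    rw [hstep]
    apply ih
    intro j hj1 hj2
    rw [pvInnerF_j] at hj1 hj2
    apply h j
    · omega
    · simp only [List.length_cons]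
      omega

theorem pvPairA_append (L : List (String × String)) (p : String × String) (m : Nat) :
    pvPairA (L ++ [p]) m =
      if m.testBit L.length then pvExtY p (pvPairA L m) else pvExtN p (pvPairA L m) := by
  unfold pvPairA
  rw [List.foldl_append]
  simp only [List.foldl_cons, List.foldl_nil]
  have hj0 : (L.foldl (pvInnerF m) ("", "", 0)).2.2 = L.length := by
    simpa using pvInner_j L m ("", "", 0)
  generalize hst : L.foldl (pvInnerF m) ("", "", 0) = st
  rw [hst] at hj0
  unfold pvInnerF
  rw [hj0]
  cases h : m.testBit L.length
  · rw [if_neg (by rw [pvCond_iff, h]; simp)]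
    simp [pvExtN]
  · rw [if_pos (by rw [pvCond_iff, h])]
    simp [pvExtY]

theorem pvSeqA_append (L : List (String × String)) (p : String × String) :
    pvSeqA (L ++ [p]) = (pvSeqA L).map (pvExtN p) ++ (pvSeqA L).map (pvExtY p) := by
  unfold pvSeqA
  have hlen : (L ++ [p]).length = L.length + 1 := by simp
  rw [hlen]
  have h2 : 2 ^ (L.length + 1) = 2 ^ L.length + 2 ^ L.length := by ring
  rw [h2, List.range_add, List.map_append, List.map_map, List.map_map, List.map_map]
  congr 1
  · apply List.map_congr_left
    intro m hm
    simp only [List.mem_range] at hm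
    show pvPairA (L ++ [p]) m = pvExtN p (pvPairA L m)
    rw [pvPairA_append, if_neg (by rw [Nat.testBit_lt_two_pow hm]; simp)]
  · apply List.map_congr_left
    intro m hm
    simp only [List.mem_range] at hm
    show pvPairA (L ++ [p]) (2 ^ L.length + m) = pvExtY p (pvPairA L m)
    rw [pvPairA_append]
    have hbit : (2 ^ L.length + m).testBit L.length = true := by
      rw [Nat.testBit_two_pow_add_eq, Nat.testBit_lt_two_pow hm]
      rfl
    rw [if_pos hbit]
    congr 1
    unfold pvPairA
    rw [pvInner_bits L (2 ^ L.length + m) m ("", "", 0)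
      (by intro j _ hj2
          simp only at hj2
          exact Nat.testBit_two_pow_add_gt (by omega) m)]

theorem pvLastVal_cons (q : String × String) (xs : List (String × String)) (k : String) :
    pvLastVal (q :: xs) k = (pvLastVal xs k).or (if q.1 == k then some q.2 else none) := by
  unfold pvLastVal
  rw [List.reverse_cons, List.find?_append, Option.map_or]
  cases h : q.1 == k <;> simp [List.find?, h]

-- get? of an insert fold
theorem pvGet_insFold (xs : List (String × String)) (d : PySem.Dict String String) (k : String) :
    (pvInsFold xs d).get? k = (pvLastVal xs k).or (d.get? k) := by
  induction xs generalizing d with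
  | nil => simp [pvInsFold, pvLastVal]
  | cons q xs ih =>
    show (pvInsFold xs (d.insert q.1 q.2)).get? k = _
    rw [ih, pvLastVal_cons, PySem.Dict.get?_insert]
    by_cases hk : k = q.1
    · have hb : (q.1 == k) = true := by simp [hk]
      rw [if_pos hk, if_pos hb]
      cases pvLastVal xs k <;> rfl
    · have hb : ¬ ((q.1 == k) = true) := by
        simp only [beq_iff_eq]
        exact fun h => hk h.symm
      rw [if_neg hk, if_neg hb]
      cases pvLastVal xs k <;> rfl

-- dict extensionality from ordered keys and lookups
theorem pvDictExt (d e : PySem.Dict String String) (hn : d.keys.Nodup)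
    (hk : d.keys = e.keys) (hg : ∀ k, d.get? k = e.get? k) : d = e := by
  apply PySem.Dict.ext
  have hkl : d.items.map Prod.fst = e.items.map Prod.fst := hk
  have hlen : d.items.length = e.items.length := by
    have := congrArg List.length hkl
    simpa using this
  have hne : e.keys.Nodup := hk ▸ hn
  apply List.ext_getElem hlen
  intro i h1 h2
  have hfst : d.items[i].1 = e.items[i].1 := by
    have h3 := List.getElem_of_eq hkl (by simpa using h1)
    simpa using h3
  have hd := PySem.Dict.get?_of_mem_items d
    (k := d.items[i].1) (v := d.items[i].2) (by simp) hn
  have he := PySem.Dict.get?_of_mem_items e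
    (k := e.items[i].1) (v := e.items[i].2) (by simp) hne
  have hgk := hg d.items[i].1
  rw [hd, hfst, he] at hgk
  have hsnd : d.items[i].2 = e.items[i].2 := by injection hgk
  exact Prod.ext hfst hsnd

-- ofList commutes with an injective map
theorem pvOfList_map {f : String → String} (hf : Function.Injective f) (xs : List String) :
    PySem.Set.ofList (xs.map f) = (PySem.Set.ofList xs).map f := by
  induction xs with
  | nil => simp
  | cons x xs ih =>
    rw [List.map_cons, PySem.Set.ofList_cons, PySem.Set.ofList_cons, ih, List.map_cons]
    congr 1
    show ((PySem.Set.ofList xs).map f).filter (fun y => !(y == f x))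
        = ((PySem.Set.ofList xs).filter (fun y => !(y == x))).map f
    rw [List.filter_map]
    congr 1
    apply List.filter_congr
    intro y _
    simp [Function.comp, hf.eq_iff]

theorem pvAppend_inj (t : String) : Function.Injective (fun s : String => s ++ t) := by
  intro a b h
  have h2 : a.toList ++ t.toList = b.toList ++ t.toList := by
    simpa using congrArg String.toList h
  rw [← String.toList_inj]
  exact List.append_cancel_right h2


-- last value in a nodup-keys item list is the dict's lookup
theorem pvLastVal_list (l : List (String × String)) (hnd : (l.map Prod.fst).Nodup) (k : String) :
    pvLastVal l k = (PySem.Dict.mk l).get? k := by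
  induction l with
  | nil =>
    show pvLastVal [] k = _
    simp [pvLastVal]
    rfl
  | cons q l ih =>
    rw [pvLastVal_cons, PySem.Dict.get?_mk_cons]
    simp only [List.map_cons, List.nodup_cons] at hnd
    cases h : q.1 == k
    · rw [if_neg (h ▸ Bool.false_ne_true), ih hnd.2]
      simp
    · have hk : q.1 = k := by simpa using h
      have hnot : pvLastVal l k = none := by
        unfold pvLastVal
        rw [List.find?_eq_none.mpr, Option.map_none]
        intro x hx
        simp only [List.mem_reverse] at hx
        have : x.1 ∈ l.map Prod.fst := List.mem_map_of_mem hx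
        simp only [beq_iff_eq]
        intro hxk
        exact hnd.1 (by rw [hxk, ← hk] at this; exact this)
      rw [hnot]
      rfl

theorem pvLastVal_items (d : PySem.Dict String String) (hn : d.keys.Nodup) (k : String) :
    pvLastVal d.items k = d.get? k := pvLastVal_list d.items hn k

theorem pvNodup_dictOf (xs : List (String × String)) : (pvDictOf xs).keys.Nodup :=
  pvNodup_insFold xs PySem.Dict.empty PySem.Dict.nodup_keys_empty

-- collapsing an insertion sequence through an injective key extension
theorem pvLastVal_mapExt {f : String → String} (hf : Function.Injective f)
    (g : String → String) (xs : List (String × String)) (k : String) :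
    pvLastVal ((pvDictOf xs).items.map (fun q => (f q.1, g q.2))) k
      = pvLastVal (xs.map (fun q => (f q.1, g q.2))) k := by
  by_cases hex : ∃ k0, f k0 = k
  · obtain ⟨k0, rfl⟩ := hex
    have key : ∀ ys : List (String × String),
        pvLastVal (ys.map (fun q => (f q.1, g q.2))) (f k0) = (pvLastVal ys k0).map g := by
      intro ys
      unfold pvLastVal
      rw [← List.map_reverse, List.find?_map]
      have hp : ((fun r : String × String => r.1 == f k0) ∘ (fun q : String × String => (f q.1, g q.2)))
          = (fun q : String × String => q.1 == k0) := by
        funext q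
        simp [Function.comp, hf.eq_iff]
      rw [hp]
      cases List.find? (fun q : String × String => q.1 == k0) ys.reverse <;> simp
    rw [key, key]
    congr 1
    rw [pvLastVal_items (pvDictOf xs) (pvNodup_dictOf xs) k0]
    show (pvInsFold xs PySem.Dict.empty).get? k0 = _
    rw [pvGet_insFold]
    simp [PySem.Dict.get?_empty]
  · have h1 : ∀ ys : List (String × String),
        pvLastVal (ys.map (fun q => (f q.1, g q.2))) k = none := by
      intro ys
      unfold pvLastVal
      rw [List.find?_eq_none.mpr, Option.map_none]
      intro x hx
      simp only [List.mem_reverse, List.mem_map] at hx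
      obtain ⟨q, _, rfl⟩ := hx
      simp only [beq_iff_eq]
      exact fun heq => hex ⟨q.1, heq⟩
    rw [h1, h1]

-- the key step: A's doubled insertion sequence equals B's dictionary-doubling step
theorem pvStep (S : List (String × String)) (p : String × String) :
    pvDictOf (S.map (pvExtN p) ++ S.map (pvExtY p)) = pvStepB (pvDictOf S) p := by
  have hfN : Function.Injective (fun k : String => k ++ "not" ++ p.1) :=
    (pvAppend_inj p.1).comp (pvAppend_inj "not")
  have hfY : Function.Injective (fun k : String => k ++ p.1) := pvAppend_inj p.1
  have hB : pvStepB (pvDictOf S) p =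
      pvInsFold ((pvDictOf S).items.map (pvExtY p))
        (pvInsFold ((pvDictOf S).items.map (pvExtN p)) PySem.Dict.empty) := by
    unfold pvStepB pvInsFold
    rw [List.foldl_map, List.foldl_map]
    rfl
  have hA : pvDictOf (S.map (pvExtN p) ++ S.map (pvExtY p)) =
      pvInsFold (S.map (pvExtY p)) (pvInsFold (S.map (pvExtN p)) PySem.Dict.empty) := by
    unfold pvDictOf pvInsFold
    rw [List.foldl_append]
  rw [hA, hB]
  have hTk : (pvDictOf S).items.map Prod.fst = PySem.Set.ofList (S.map Prod.fst) := by
    show (pvDictOf S).keys = _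
    unfold pvDictOf
    rw [pvKeys_insFold, PySem.Dict.keys_empty, PySem.Set.update_nil_left]
  have hmapN : ∀ ys : List (String × String),
      (ys.map (pvExtN p)).map Prod.fst = (ys.map Prod.fst).map (fun k => k ++ "not" ++ p.1) := by
    intro ys; rw [List.map_map, List.map_map]; rfl
  have hmapY : ∀ ys : List (String × String),
      (ys.map (pvExtY p)).map Prod.fst = (ys.map Prod.fst).map (fun k => k ++ p.1) := by
    intro ys; rw [List.map_map, List.map_map]; rfl
  apply pvDictExt
  · exact pvNodup_insFold _ _ (pvNodup_insFold _ _ PySem.Dict.nodup_keys_empty)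
  · rw [pvKeys_insFold, pvKeys_insFold, pvKeys_insFold, pvKeys_insFold,
      PySem.Dict.keys_empty, PySem.Set.update_nil_left, PySem.Set.update_nil_left,
      hmapN, hmapN, hmapY, hmapY, hTk]
    rw [pvOfList_map hfN, pvOfList_map hfN, PySem.Set.ofList_ofList]
    rw [PySem.Set.update_eq_append_filter, PySem.Set.update_eq_append_filter]
    congr 1
    rw [pvOfList_map hfY, pvOfList_map hfY, PySem.Set.ofList_ofList]
  · intro k
    rw [pvGet_insFold, pvGet_insFold, pvGet_insFold, pvGet_insFold]
    have heN : (fun q : String × String =>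
        ((fun k => k ++ "not" ++ p.1) q.1, (fun v => v ++ " /\\ \\lnot(" ++ p.2 ++ ")") q.2)) = pvExtN p := by
      funext q; rfl
    have heY : (fun q : String × String =>
        ((fun k => k ++ p.1) q.1, (fun v => v ++ " /\\ " ++ p.2) q.2)) = pvExtY p := by
      funext q; rfl
    have e1 := pvLastVal_mapExt hfY (fun v => v ++ " /\\ " ++ p.2) S k
    have e2 := pvLastVal_mapExt hfN (fun v => v ++ " /\\ \\lnot(" ++ p.2 ++ ")") S k
    rw [heY] at e1
    rw [heN] at e2
    rw [e1, e2]

-- main induction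
theorem pvMain (L : List (String × String)) : pvDictOf (pvSeqA L) = pvDictB L := by
  induction L using List.reverseRecOn with
  | nil => rfl
  | append_singleton L p ih =>
    rw [pvSeqA_append, pvStep, ih]
    show _ = List.foldl pvStepB (PySem.Dict.empty.insert "" "") (L ++ [p])
    rw [List.foldl_append]
    rfl

-- A's keys-fold with lookups is the items-fold
theorem pvKeysFold (d : PySem.Dict String String) (hn : d.keys.Nodup) (m : Nat) :
    d.keys.foldl (fun (st : String × String × Nat) predicado =>
        if PySem.Int.band (m : Int) ((1 : Int) <<< st.2.2) ≠ 0 then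
          (st.1 ++ " /\\ " ++ d.getD predicado "", st.2.1 ++ predicado, st.2.2 + 1)
        else
          (st.1 ++ " /\\ \\lnot(" ++ d.getD predicado "" ++ ")", st.2.1 ++ "not" ++ predicado, st.2.2 + 1))
      ("", "", 0) = d.items.foldl (pvInnerF m) ("", "", 0) := by
  show (d.items.map Prod.fst).foldl _ _ = _
  rw [List.foldl_map]
  apply PySem.List.foldl_congr_mem
  intro acc q hq
  have hv := PySem.Dict.getD_of_mem_items d (k := q.1) (v := q.2) (by simpa using hq) hn ""
  rw [hv]
  rfl

-- A's whole mask loop, as a fold of insertions of pvPairA pairs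
theorem pvA_eq (d : PySem.Dict String String) (hn : d.keys.Nodup) :
    (PySem.List.pyRange 0 ((1 : Int) <<< d.size) 1).foldl
      (fun result i =>
        let st : String × String × Nat :=
          d.keys.foldl (fun st predicado =>
            if PySem.Int.band i ((1 : Int) <<< st.2.2) ≠ 0 then
              (st.1 ++ " /\\ " ++ d.getD predicado "", st.2.1 ++ predicado, st.2.2 + 1)
            else
              (st.1 ++ " /\\ \\lnot(" ++ d.getD predicado "" ++ ")", st.2.1 ++ "not" ++ predicado, st.2.2 + 1))
            ("", "", 0)
        result.insert st.2.1 st.1)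
      PySem.Dict.empty = pvDictOf (pvSeqA d.items) := by
  have h1 : (1 : Int) <<< d.size = ((2 ^ d.size : Nat) : Int) := by
    rw [Int.shiftLeft_eq]; push_cast; ring
  rw [h1, PySem.List.pyRange_zero_natCast, List.foldl_map]
  have h2 : ∀ (result : PySem.Dict String String) (m : Nat),
      (let st : String × String × Nat :=
          d.keys.foldl (fun st predicado =>
            if PySem.Int.band (m : Int) ((1 : Int) <<< st.2.2) ≠ 0 then
              (st.1 ++ " /\\ " ++ d.getD predicado "", st.2.1 ++ predicado, st.2.2 + 1)
            else
              (st.1 ++ " /\\ \\lnot(" ++ d.getD predicado "" ++ ")", st.2.1 ++ "not" ++ predicado, st.2.2 + 1))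
            ("", "", 0);
        result.insert st.2.1 st.1)
      = result.insert (pvPairA d.items m).1 (pvPairA d.items m).2 := by
    intro result m
    simp only [pvKeysFold d hn m]
    rfl
  refine (PySem.List.foldl_congr_mem _ _
      (fun (result : PySem.Dict String String) (m : Nat) =>
        result.insert (pvPairA d.items m).1 (pvPairA d.items m).2)
      PySem.Dict.empty (fun acc m _ => h2 acc m)).trans ?_
  unfold pvDictOf pvInsFold pvSeqA
  rw [List.foldl_map]
  rfl

-- ===== VERDICT (by name: the statement is the Claim_ definition above) =====
theorem generar_estados_spec : Claim_equal_generar_estados := by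
  intro L _
  show generar_estados L = generar_estados_alt L
  exact congrArg PySem.Dict.items
    ((pvA_eq (PySem.Dict.ofList L) (PySem.Dict.nodup_keys_ofList L)).trans
      (pvMain (PySem.Dict.ofList L).items))
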